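-- pv_equiv track=rewrite | github.com/Longcat2957/baekjoon_study | solved_ac/class_3_+/9095.py | func_return_list
-- ===== SOURCE A (Python) =====
-- def func_return_list(n:int):
--     comb = []
--     max_3 = n // 3
--     max_2 = n // 2
--     for i in range(max_3 + 1):
--         for j in range(max_2 + 1):
--             for k in range(n+1):
--                 if 3 * i + 2 * j + k == n:
--                     comb.append([i,j,k])
--     return comb
-- ===== SOURCE B (Python) =====
-- def func_return_list(n: int):
--     comb = []
--     for i in range(n // 3 + 1):
--         m = n - 3 * i
--         comb.extend([i, j, m - 2 * j] for j in range(m // 2 + 1))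
--     return comb
-- ===== Notes on version B (the rewrite author's own statement) =====
-- stated objective: faster
-- what changed: B removes both of A's inner scans: for each i it sets m = n-3i and extends the result with the closed-form triples [i, j, m-2j] for j up to m//2, so the per-i work is proportional to the output instead of A's O(n^2) inner scans.
import Mathlib
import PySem

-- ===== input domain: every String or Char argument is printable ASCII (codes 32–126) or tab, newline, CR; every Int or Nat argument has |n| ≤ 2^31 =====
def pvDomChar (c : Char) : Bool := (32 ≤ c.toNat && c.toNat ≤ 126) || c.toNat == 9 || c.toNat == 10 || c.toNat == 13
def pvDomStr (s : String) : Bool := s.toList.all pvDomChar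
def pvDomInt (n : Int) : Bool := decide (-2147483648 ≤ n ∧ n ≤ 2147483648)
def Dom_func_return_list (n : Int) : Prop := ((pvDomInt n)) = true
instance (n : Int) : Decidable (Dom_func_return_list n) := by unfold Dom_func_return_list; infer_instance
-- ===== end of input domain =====

-- B removes A's two inner scans: per i it extends the output with the closed-form triples
-- [i, j, (n-3i)-2j] for j up to (n-3i)//2 (objective: faster).
-- ===== PORT A =====
def func_return_list (n : Int) : List (List Int) :=
  let max3 := PySem.Int.floordiv n 3
  let max2 := PySem.Int.floordiv n 2
  (PySem.List.pyRange 0 (max3 + 1) 1).foldl (fun comb i =>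
    (PySem.List.pyRange 0 (max2 + 1) 1).foldl (fun comb j =>
      (PySem.List.pyRange 0 (n + 1) 1).foldl (fun comb k =>
        if 3 * i + 2 * j + k = n then comb ++ [[i, j, k]] else comb) comb) comb) []

-- ===== PORT B =====
def func_return_list_alt (n : Int) : List (List Int) :=
  (PySem.List.pyRange 0 (PySem.Int.floordiv n 3 + 1) 1).foldl (fun comb i =>
    let m := n - 3 * i
    comb ++ (PySem.List.pyRange 0 (PySem.Int.floordiv m 2 + 1) 1).map
      (fun j => [i, j, m - 2 * j])) []

-- ===== PRECONDITION & SPEC =====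
def Spec_func_return_list (n : Int) (out : List (List Int)) : Prop := out = func_return_list_alt n
instance (n : Int) (out : List (List Int)) : Decidable (Spec_func_return_list n out) := by unfold Spec_func_return_list; infer_instance

-- ===== CLAIM (what is proved, stated in full; the proofs are below) =====
def Claim_equal_func_return_list : Prop := ∀ (n : Int), Dom_func_return_list n → Spec_func_return_list n (func_return_list n)

-- ===== LEMMAS AND PROOFS =====

-- The filter of range(0, n+1) by 'k = c' is [c] when 0 ≤ c ≤ n, else [].
lemma filter_range_eq (n c : Int) (hle : c ≤ n) :
    (PySem.List.pyRange 0 (n + 1) 1).filter (fun k => decide (k = c))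
      = if 0 ≤ c then [c] else [] := by
  split_ifs with h
  · have hmem : c ∈ PySem.List.pyRange 0 (n + 1) 1 := by
      rw [PySem.List.mem_pyRange_one]; omega
    have hnd := PySem.List.nodup_pyRange_one (a := 0) (b := n + 1)
    generalize PySem.List.pyRange 0 (n + 1) 1 = l at hmem hnd
    induction l with
    | nil => cases hmem
    | cons x xs ih =>
      rcases List.mem_cons.mp hmem with h1 | h1
      · subst h1
        have hfe : xs.filter (fun k => decide (k = c)) = [] := by
          apply List.filter_eq_nil_iff.mpr
          intro a ha
          simp only [decide_eq_true_eq]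
          intro hax; subst hax
          exact (List.nodup_cons.mp hnd).1 ha
        simp [hfe]
      · have hne : x ≠ c := by
          intro hx; subst hx
          exact (List.nodup_cons.mp hnd).1 h1
        rw [List.filter_cons]
        simp only [decide_eq_true_eq, hne, if_false]
        exact ih h1 (List.nodup_cons.mp hnd).2
  · apply List.filter_eq_nil_iff.mpr
    intro a ha
    rw [PySem.List.mem_pyRange_one] at ha
    simp only [decide_eq_true_eq]
    omega

-- A's innermost k-loop equals a direct conditional append, for 0 ≤ i, 0 ≤ j.
lemma inner_loop_eq (n i j : Int) (hi : 0 ≤ i) (hj : 0 ≤ j) (acc : List (List Int)) :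
    (PySem.List.pyRange 0 (n + 1) 1).foldl (fun comb k =>
        if 3 * i + 2 * j + k = n then comb ++ [[i, j, k]] else comb) acc
      = if 0 ≤ n - 3 * i - 2 * j then acc ++ [[i, j, n - 3 * i - 2 * j]] else acc := by
  rw [PySem.List.foldl_append_ite (p := fun k => 3 * i + 2 * j + k = n)
      (f := fun k => [i, j, k])]
  have hp : (fun k => decide (3 * i + 2 * j + k = n))
      = (fun k => decide (k = n - 3 * i - 2 * j)) := by
    funext k; simp only [decide_eq_decide]; omega
  rw [hp, filter_range_eq n (n - 3 * i - 2 * j) (by omega)]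
  split_ifs with h <;> simp

-- Filtering range(0, b) by 'j ≤ t' gives range(0, t+1) when -1 ≤ t ≤ b-1.
lemma filter_range_le (b t : Int) (ht0 : -1 ≤ t) (htb : t + 1 ≤ b) :
    (PySem.List.pyRange 0 b 1).filter (fun j => decide (j ≤ t))
      = PySem.List.pyRange 0 (t + 1) 1 := by
  rw [PySem.List.pyRange_one_append 0 (t + 1) b (by omega) htb, List.filter_append]
  have h1 : (PySem.List.pyRange 0 (t + 1) 1).filter (fun j => decide (j ≤ t))
      = PySem.List.pyRange 0 (t + 1) 1 := by
    apply List.filter_eq_self.mpr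
    intro a ha
    rw [PySem.List.mem_pyRange_one] at ha
    simp only [decide_eq_true_eq]; omega
  have h2 : (PySem.List.pyRange (t + 1) b 1).filter (fun j => decide (j ≤ t)) = [] := by
    apply List.filter_eq_nil_iff.mpr
    intro a ha
    rw [PySem.List.mem_pyRange_one] at ha
    simp only [decide_eq_true_eq]; omega
  rw [h1, h2, List.append_nil]

-- A's middle j-loop (with its inner k-loop) equals B's per-i closed-form extension.
lemma per_i_eq (n i : Int) (hi : 0 ≤ i) (h3 : 3 * i ≤ n) (acc : List (List Int)) :
    (PySem.List.pyRange 0 (PySem.Int.floordiv n 2 + 1) 1).foldl (fun comb j =>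
      (PySem.List.pyRange 0 (n + 1) 1).foldl (fun comb k =>
        if 3 * i + 2 * j + k = n then comb ++ [[i, j, k]] else comb) comb) acc
      = acc ++ (PySem.List.pyRange 0 (PySem.Int.floordiv (n - 3 * i) 2 + 1) 1).map
          (fun j => [i, j, (n - 3 * i) - 2 * j]) := by
  have hstep : (PySem.List.pyRange 0 (PySem.Int.floordiv n 2 + 1) 1).foldl (fun comb j =>
      (PySem.List.pyRange 0 (n + 1) 1).foldl (fun comb k =>
        if 3 * i + 2 * j + k = n then comb ++ [[i, j, k]] else comb) comb) acc
      = (PySem.List.pyRange 0 (PySem.Int.floordiv n 2 + 1) 1).foldl (fun comb j =>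
          if 0 ≤ n - 3 * i - 2 * j then comb ++ [[i, j, n - 3 * i - 2 * j]] else comb) acc := by
    apply PySem.List.foldl_congr_mem
    intro a j hj
    rw [PySem.List.mem_pyRange_one] at hj
    exact inner_loop_eq n i j hi hj.1 a
  rw [hstep, PySem.List.foldl_append_ite (p := fun j => 0 ≤ n - 3 * i - 2 * j)
      (f := fun j => [i, j, n - 3 * i - 2 * j])]
  have hd2 : PySem.Int.floordiv n 2 = n / 2 := PySem.Int.floordiv_eq_ediv_of_pos (by norm_num)
  have hm2 : PySem.Int.floordiv (n - 3 * i) 2 = (n - 3 * i) / 2 :=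
    PySem.Int.floordiv_eq_ediv_of_pos (by norm_num)
  have hp : (fun j => decide (0 ≤ n - 3 * i - 2 * j))
      = (fun j => decide (j ≤ (n - 3 * i) / 2)) := by
    funext j; simp only [decide_eq_decide]; omega
  rw [hp, hd2, hm2, filter_range_le (n / 2 + 1) ((n - 3 * i) / 2) (by omega) (by omega)]

-- ===== VERDICT (by name: the statement is the Claim_ definition above) =====
theorem func_return_list_spec : Claim_equal_func_return_list := by
  intro n _
  unfold Spec_func_return_list func_return_list func_return_list_alt
  apply PySem.List.foldl_congr_mem
  intro acc i hi
  rw [PySem.List.mem_pyRange_one] at hi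
  have hd3 : PySem.Int.floordiv n 3 = n / 3 :=
    PySem.Int.floordiv_eq_ediv_of_pos (by norm_num)
  have h3 : 3 * i ≤ n := by
    rw [hd3] at hi; omega
  exact per_i_eq n i hi.1 h3 acc
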